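-- pv_equiv track=rewrite | github.com/misterjordy/artifact-v2 | artiFACT/scripts/seed_v1_data.py | _parse_values_block
-- ===== SOURCE A (Python) =====
-- def _parse_values_block(text: str) -> list[list[str]]:
--     """Parse MySQL VALUES block into list of row value lists.
--
--     Handles escaped quotes, NULL values, and nested parentheses.
--     """
--     rows: list[list[str]] = []
--     i = 0
--     length = len(text)
--
--     while i < length:
--         if text[i] == "(":
--             values, end_pos = _parse_single_row(text, i)
--             rows.append(values)
--             i = end_pos
--         else:
--             i += 1
--
--     return rows
--
-- def _parse_single_row(text: str, start: int) -> tuple[list[str], int]: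
--     """Parse a single parenthesized row of values starting at position start."""
--     values: list[str] = []
--     i = start + 1  # skip opening paren
--     length = len(text)
--
--     while i < length:
--         # Skip whitespace
--         while i < length and text[i] in (" ", "\t", "\n"):
--             i += 1
--
--         if i >= length:
--             break
--
--         if text[i] == ")":
--             return values, i + 1
--
--         if text[i] == ",":
--             i += 1
--             continue
--
--         if text[i] == "'":
--             # Quoted string value
--             val, end = _parse_quoted_string(text, i)
--             values.append(val)
--             i = end
--         elif text[i:i + 4].upper() == "NULL":
--             values.append("NULL")
--             i += 4
--         else:
--             # Unquoted value (number, etc.)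
--             end = i
--             while end < length and text[end] not in (",", ")"):
--                 end += 1
--             values.append(text[i:end].strip())
--             i = end
--
--     return values, i
--
-- def _parse_quoted_string(text: str, start: int) -> tuple[str, int]:
--     """Parse a single-quoted MySQL string starting at position start.
--
--     Handles escaped quotes (\' and '') and backslash escapes.
--     """
--     result: list[str] = []
--     i = start + 1  # skip opening quote
--     length = len(text)
--
--     while i < length:
--         ch = text[i]
--         if ch == "\\" and i + 1 < length:
--             next_ch = text[i + 1]
--             if next_ch == "'":
--                 result.append("'")
--                 i += 2
--             elif next_ch == "\\":
--                 result.append("\\")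
--                 i += 2
--             elif next_ch == "n":
--                 result.append("\n")
--                 i += 2
--             else:
--                 result.append(next_ch)
--                 i += 2
--         elif ch == "'" and i + 1 < length and text[i + 1] == "'":
--             result.append("'")
--             i += 2
--         elif ch == "'":
--             return "".join(result), i + 1
--         else:
--             result.append(ch)
--             i += 1
--
--     return "".join(result), i
-- ===== SOURCE B (Python) =====
-- def _parse_values_block(text: str) -> list[list[str]]:
--     """Parse MySQL VALUES block into list of row value lists.
--
--     Single flat state-machine walk: state 0 = outside a row, 1 = inside a
--     row, 2 = inside a quoted string; no sub-parsers returning positions.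
--     """
--     rows: list[list[str]] = []
--     row: list[str] | None = None
--     buf: list[str] = []
--     state = 0
--     i = 0
--     n = len(text)
--
--     while i < n:
--         ch = text[i]
--         if state == 0:
--             if ch == "(":
--                 row = []
--                 state = 1
--             i += 1
--         elif state == 1:
--             if ch in (" ", "\t", "\n"):
--                 i += 1
--             elif ch == ")":
--                 rows.append(row)
--                 row = None
--                 state = 0
--                 i += 1
--             elif ch == ",":
--                 i += 1
--             elif ch == "'":
--                 buf = []
--                 state = 2
--                 i += 1
--             elif text[i:i + 4].upper() == "NULL":
--                 row.append("NULL")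
--                 i += 4
--             else:
--                 j = i
--                 while j < n and text[j] not in (",", ")"):
--                     j += 1
--                 row.append(text[i:j].strip())
--                 i = j
--         else:  # state == 2, inside a quoted string
--             if ch == "\\" and i + 1 < n:
--                 nxt = text[i + 1]
--                 buf.append("\n" if nxt == "n" else nxt)
--                 i += 2
--             elif ch == "'" and i + 1 < n and text[i + 1] == "'":
--                 buf.append("'")
--                 i += 2
--             elif ch == "'":
--                 row.append("".join(buf))
--                 state = 1
--                 i += 1
--             else:
--                 buf.append(ch)
--                 i += 1
--
--     if state == 2:
--         row.append("".join(buf))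
--     if row is not None:
--         rows.append(row)
--     return rows
-- ===== Notes on version B (the rewrite author's own statement) =====
-- stated objective: alternative
-- what changed: Replaced the recursive-descent decomposition (three sub-parsers returning end positions, with a nested whitespace-skip loop per row step) by one flat state-machine loop (outside-row / in-row / in-quote) that walks the text once carrying row and quote-buffer accumulators.
import Mathlib
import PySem

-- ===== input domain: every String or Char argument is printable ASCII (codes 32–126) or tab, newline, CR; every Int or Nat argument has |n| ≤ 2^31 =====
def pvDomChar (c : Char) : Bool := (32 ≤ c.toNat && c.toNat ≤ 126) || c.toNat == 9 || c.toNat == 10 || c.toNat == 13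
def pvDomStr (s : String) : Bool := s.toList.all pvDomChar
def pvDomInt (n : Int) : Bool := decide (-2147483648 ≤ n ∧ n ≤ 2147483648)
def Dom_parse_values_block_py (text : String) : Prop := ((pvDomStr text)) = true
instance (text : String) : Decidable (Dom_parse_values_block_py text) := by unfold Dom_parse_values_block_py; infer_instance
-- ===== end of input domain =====

-- B re-implements A's recursive-descent parser (sub-parsers returning end positions) as one
-- flat three-state machine walking the text once; same return value, no speed claim.

-- ===== PORT A =====
-- A works on `text` by integer index; the ports index `text.toList`. A slice `text[a:b]` with
-- 0 ≤ a ≤ b is `(cs.drop a).take (b - a)`, `.upper()` is `PySem.Chars.upper`, `.strip()` is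
-- `PySem.Chars.strip`, `"".join(result)` is `PySem.Str.join ""`.

-- arithmetic facts the recursive definitions cite in their decreasing_by (kept as named
-- theorems so the termination proofs are small applications)
theorem pvDecLt (n i j : Nat) (h : i < n) (hij : i < j) : n - j < n - i := by omega
theorem pvLtAdd (i d : Nat) (hd : 0 < d) : i < i + d := Nat.lt_add_of_pos_right hd
theorem pvDecVia (n i j e : Nat) (hij : i ≤ j) (h : j < n) (hje : j < e) : n - e < n - i := by omega

-- _parse_quoted_string's loop (i = position after the opening quote, result = accumulator)
def pvA_quoted_go (cs : List Char) (i : Nat) (result : List String) : String × Nat :=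
  if h : i < cs.length then
    if cs[i] = '\\' ∧ i + 1 < cs.length then
      if cs.getD (i+1) ' ' = '\'' then pvA_quoted_go cs (i+2) (result ++ ["'"])
      else if cs.getD (i+1) ' ' = '\\' then pvA_quoted_go cs (i+2) (result ++ ["\\"])
      else if cs.getD (i+1) ' ' = 'n' then pvA_quoted_go cs (i+2) (result ++ ["\n"])
      else pvA_quoted_go cs (i+2) (result ++ [String.ofList [cs.getD (i+1) ' ']])
    else if cs[i] = '\'' ∧ i + 1 < cs.length ∧ cs.getD (i+1) ' ' = '\'' then
      pvA_quoted_go cs (i+2) (result ++ ["'"])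
    else if cs[i] = '\'' then (PySem.Str.join "" result, i + 1)
    else pvA_quoted_go cs (i+1) (result ++ [String.ofList [cs[i]]])
  else (PySem.Str.join "" result, i)
termination_by cs.length - i
decreasing_by all_goals exact pvDecLt cs.length i _ h (pvLtAdd i _ (by decide))

-- `while i < length and text[i] in (" ", "\t", "\n"): i += 1`
def pvA_skipWs (cs : List Char) (i : Nat) : Nat :=
  if h : i < cs.length then
    if cs[i] = ' ' ∨ cs[i] = '\t' ∨ cs[i] = '\n' then pvA_skipWs cs (i+1) else i
  else i
termination_by cs.length - i
decreasing_by exact pvDecLt cs.length i _ h (pvLtAdd i 1 (by decide))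

-- `while end < length and text[end] not in (",", ")"): end += 1`
def pvA_scanEnd (cs : List Char) (i : Nat) : Nat :=
  if h : i < cs.length then
    if cs[i] = ',' ∨ cs[i] = ')' then i else pvA_scanEnd cs (i+1)
  else i
termination_by cs.length - i
decreasing_by exact pvDecLt cs.length i _ h (pvLtAdd i 1 (by decide))

-- bounds facts the recursive definitions below cite in their decreasing_by
theorem pvA_skipWs_ge (cs : List Char) (i : Nat) : i ≤ pvA_skipWs cs i := by
  fun_induction pvA_skipWs cs i <;> omega

theorem pvA_scanEnd_ge (cs : List Char) (i : Nat) : i ≤ pvA_scanEnd cs i := by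
  fun_induction pvA_scanEnd cs i <;> omega

theorem pvA_scanEnd_gt (cs : List Char) (i : Nat) (h : i < cs.length)
    (h2 : ¬ cs[i] = ',') (h3 : ¬ cs[i] = ')') : i < pvA_scanEnd cs i := by
  rw [pvA_scanEnd, dif_pos h, if_neg (fun hor => hor.elim h2 h3)]
  have := pvA_scanEnd_ge cs (i+1); omega

theorem pvA_quoted_go_ge (cs : List Char) (i : Nat) (r : List String) :
    i ≤ (pvA_quoted_go cs i r).2 := by
  fun_induction pvA_quoted_go cs i r <;> simp_all <;> omega

-- _parse_single_row's loop (i = current position, values = accumulator); the body acts at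
-- j = position after the whitespace skip, exactly as the Python loop does
def pvA_row_go (cs : List Char) (i : Nat) (values : List String) : List String × Nat :=
  if h : pvA_skipWs cs i < cs.length then
    if (cs[pvA_skipWs cs i]'h) = ')' then (values, pvA_skipWs cs i + 1)
    else if (cs[pvA_skipWs cs i]'h) = ',' then pvA_row_go cs (pvA_skipWs cs i + 1) values
    else if (cs[pvA_skipWs cs i]'h) = '\'' then
      pvA_row_go cs (pvA_quoted_go cs (pvA_skipWs cs i + 1) []).2
        (values ++ [(pvA_quoted_go cs (pvA_skipWs cs i + 1) []).1])
    else if PySem.Chars.upper ((cs.drop (pvA_skipWs cs i)).take 4) = ['N','U','L','L'] then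
      pvA_row_go cs (pvA_skipWs cs i + 4) (values ++ ["NULL"])
    else
      pvA_row_go cs (pvA_scanEnd cs (pvA_skipWs cs i))
        (values ++ [String.ofList (PySem.Chars.strip
          ((cs.drop (pvA_skipWs cs i)).take (pvA_scanEnd cs (pvA_skipWs cs i) - pvA_skipWs cs i)))])
  else (values, pvA_skipWs cs i)
termination_by cs.length - i
decreasing_by
  · exact pvDecVia cs.length i _ _ (pvA_skipWs_ge cs i) h (pvLtAdd _ 1 (by decide))
  · exact pvDecVia cs.length i _ _ (pvA_skipWs_ge cs i) h
      (Nat.lt_of_lt_of_le (pvLtAdd _ 1 (by decide)) (pvA_quoted_go_ge cs (pvA_skipWs cs i + 1) []))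
  · exact pvDecVia cs.length i _ _ (pvA_skipWs_ge cs i) h (pvLtAdd _ 4 (by decide))
  · exact pvDecVia cs.length i _ _ (pvA_skipWs_ge cs i) h
      (pvA_scanEnd_gt cs (pvA_skipWs cs i) h (by assumption) (by assumption))

theorem pvA_row_go_ge_aux (cs : List Char) : ∀ k, ∀ i v, cs.length - i ≤ k → i ≤ (pvA_row_go cs i v).2 := by
  intro k
  induction k with
  | zero =>
    intro i v hk
    have hs := pvA_skipWs_ge cs i
    rw [pvA_row_go, dif_neg (by omega)]
    simpa using hs
  | succ k ih =>
    intro i v hk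
    have hs := pvA_skipWs_ge cs i
    rw [pvA_row_go]
    by_cases h : pvA_skipWs cs i < cs.length
    · rw [dif_pos h]
      split_ifs with h1 h2 h3 h4
      · simp; omega
      · have := ih (pvA_skipWs cs i + 1) v (by omega); omega
      · have hq := pvA_quoted_go_ge cs (pvA_skipWs cs i + 1) []
        have := ih (pvA_quoted_go cs (pvA_skipWs cs i + 1) []).2 (v ++ [(pvA_quoted_go cs (pvA_skipWs cs i + 1) []).1]) (by omega); omega
      · have := ih (pvA_skipWs cs i + 4) (v ++ ["NULL"]) (by omega); omega
      · have he := pvA_scanEnd_gt cs (pvA_skipWs cs i) h h2 h1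
        have := ih (pvA_scanEnd cs (pvA_skipWs cs i)) (v ++ [String.ofList (PySem.Chars.strip ((cs.drop (pvA_skipWs cs i)).take (pvA_scanEnd cs (pvA_skipWs cs i) - pvA_skipWs cs i)))]) (by omega); omega
    · rw [dif_neg h]; simpa using hs

theorem pvA_row_go_ge (cs : List Char) (i : Nat) (v : List String) :
    i ≤ (pvA_row_go cs i v).2 :=
  pvA_row_go_ge_aux cs (cs.length - i) i v le_rfl

-- _parse_values_block's outer loop
def pvA_outer (cs : List Char) (i : Nat) (rows : List (List String)) : List (List String) :=
  if h : i < cs.length then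
    if cs[i] = '(' then
      pvA_outer cs (pvA_row_go cs (i+1) []).2 (rows ++ [(pvA_row_go cs (i+1) []).1])
    else pvA_outer cs (i+1) rows
  else rows
termination_by cs.length - i
decreasing_by
  · exact pvDecLt cs.length i _ h
      (Nat.lt_of_lt_of_le (pvLtAdd i 1 (by decide)) (pvA_row_go_ge cs (i+1) []))
  · exact pvDecLt cs.length i _ h (pvLtAdd i 1 (by decide))

def parse_values_block_py (text : String) : List (List String) :=
  pvA_outer text.toList 0 []

-- ===== PORT B =====
-- B's inner `while j < n and text[j] not in (",", ")")`
def pvB_scan (cs : List Char) (j : Nat) : Nat :=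
  if h : j < cs.length then
    if cs[j] = ',' ∨ cs[j] = ')' then j else pvB_scan cs (j+1)
  else j
termination_by cs.length - j
decreasing_by exact pvDecLt cs.length j _ h (pvLtAdd j 1 (by decide))

theorem pvB_scan_ge (cs : List Char) (j : Nat) : j ≤ pvB_scan cs j := by
  fun_induction pvB_scan cs j <;> omega

theorem pvB_scan_gt (cs : List Char) (j : Nat) (h : j < cs.length)
    (h2 : ¬ cs[j] = ',') (h3 : ¬ cs[j] = ')') : j < pvB_scan cs j := by
  rw [pvB_scan, dif_pos h, if_neg (fun hor => hor.elim h2 h3)]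
  have := pvB_scan_ge cs (j+1); omega

-- B's single flat loop: state 0 = outside a row, 1 = in a row, 2 = in a quoted string;
-- `row is None` in the Python corresponds exactly to state 0, so row is carried as a list.
def pvB_go (cs : List Char) (i : Nat) (state : Nat) (row : List String) (buf : List String)
    (rows : List (List String)) : List (List String) :=
  if h : i < cs.length then
    if state = 0 then
      if cs[i] = '(' then pvB_go cs (i+1) 1 [] buf rows
      else pvB_go cs (i+1) 0 row buf rows
    else if state = 1 then
      if cs[i] = ' ' ∨ cs[i] = '\t' ∨ cs[i] = '\n' then pvB_go cs (i+1) 1 row buf rows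
      else if cs[i] = ')' then pvB_go cs (i+1) 0 [] buf (rows ++ [row])
      else if cs[i] = ',' then pvB_go cs (i+1) 1 row buf rows
      else if cs[i] = '\'' then pvB_go cs (i+1) 2 row [] rows
      else if PySem.Chars.upper ((cs.drop i).take 4) = ['N','U','L','L'] then
        pvB_go cs (i+4) 1 (row ++ ["NULL"]) buf rows
      else
        pvB_go cs (pvB_scan cs i) 1
          (row ++ [String.ofList (PySem.Chars.strip ((cs.drop i).take (pvB_scan cs i - i)))]) buf rows
    else
      if cs[i] = '\\' ∧ i + 1 < cs.length then
        pvB_go cs (i+2) 2 row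
          (buf ++ [if cs.getD (i+1) ' ' = 'n' then "\n" else String.ofList [cs.getD (i+1) ' ']]) rows
      else if cs[i] = '\'' ∧ i + 1 < cs.length ∧ cs.getD (i+1) ' ' = '\'' then
        pvB_go cs (i+2) 2 row (buf ++ ["'"]) rows
      else if cs[i] = '\'' then pvB_go cs (i+1) 1 (row ++ [PySem.Str.join "" buf]) buf rows
      else pvB_go cs (i+1) 2 row (buf ++ [String.ofList [cs[i]]]) rows
  else
    if state = 2 then rows ++ [row ++ [PySem.Str.join "" buf]]
    else if state = 0 then rows
    else rows ++ [row]
termination_by cs.length - i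
decreasing_by
  all_goals first
    | exact pvDecLt cs.length i _ h (pvLtAdd i _ (by decide))
    | exact pvDecLt cs.length i _ h (pvB_scan_gt cs i h (by assumption) (by assumption))

def parse_values_block_py_alt (text : String) : List (List String) :=
  pvB_go text.toList 0 0 [] [] []

-- ===== PRECONDITION & SPEC =====
def Spec_parse_values_block_py (text : String) (out : List (List String)) : Prop := out = parse_values_block_py_alt text
instance (text : String) (out : List (List String)) : Decidable (Spec_parse_values_block_py text out) := by unfold Spec_parse_values_block_py; infer_instance

-- ===== CLAIM (what is proved, stated in full; the proofs are below) =====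
def Claim_equal_parse_values_block_py : Prop := ∀ (text : String), Dom_parse_values_block_py text → Spec_parse_values_block_py text (parse_values_block_py text)

-- ===== LEMMAS AND PROOFS =====

theorem pvA_skipWs_eof (cs : List Char) (i : Nat) (h : cs.length ≤ i) : pvA_skipWs cs i = i := by
  rw [pvA_skipWs, dif_neg (by omega)]

theorem pvA_skipWs_stop (cs : List Char) (i : Nat) (h : i < cs.length)
    (hw : ¬ (cs[i] = ' ' ∨ cs[i] = '\t' ∨ cs[i] = '\n')) : pvA_skipWs cs i = i := by
  rw [pvA_skipWs, dif_pos h, if_neg hw]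

theorem pvA_skipWs_step (cs : List Char) (i : Nat) (h : i < cs.length)
    (hw : cs[i] = ' ' ∨ cs[i] = '\t' ∨ cs[i] = '\n') :
    pvA_skipWs cs i = pvA_skipWs cs (i+1) := by
  rw [pvA_skipWs, dif_pos h, if_pos hw]

theorem pv_scan_eq (cs : List Char) (j : Nat) : pvB_scan cs j = pvA_scanEnd cs j := by
  fun_induction pvB_scan cs j <;> rw [pvA_scanEnd] <;> simp_all

-- pvA_row_go where the leading whitespace skip is trivial / steps once
theorem pvA_row_go_eof (cs : List Char) (i : Nat) (v : List String) (h : cs.length ≤ i) :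
    pvA_row_go cs i v = (v, i) := by
  have hsw := pvA_skipWs_eof cs i h
  rw [pvA_row_go]; simp only [hsw]; rw [dif_neg (by omega)]

theorem pvA_row_go_ws (cs : List Char) (i : Nat) (v : List String) (h : i < cs.length)
    (hw : cs[i] = ' ' ∨ cs[i] = '\t' ∨ cs[i] = '\n') :
    pvA_row_go cs i v = pvA_row_go cs (i+1) v := by
  have hstep := pvA_skipWs_step cs i h hw
  conv_rhs => rw [pvA_row_go]
  conv_lhs => rw [pvA_row_go]
  simp only [hstep]

theorem pvA_row_go_step (cs : List Char) (i : Nat) (v : List String) (h : i < cs.length)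
    (hw : ¬ (cs[i] = ' ' ∨ cs[i] = '\t' ∨ cs[i] = '\n')) :
    pvA_row_go cs i v =
      if cs[i] = ')' then (v, i + 1)
      else if cs[i] = ',' then pvA_row_go cs (i+1) v
      else if cs[i] = '\'' then
        pvA_row_go cs (pvA_quoted_go cs (i+1) []).2 (v ++ [(pvA_quoted_go cs (i+1) []).1])
      else if PySem.Chars.upper ((cs.drop i).take 4) = ['N','U','L','L'] then
        pvA_row_go cs (i+4) (v ++ ["NULL"])
      else
        pvA_row_go cs (pvA_scanEnd cs i)
          (v ++ [String.ofList (PySem.Chars.strip ((cs.drop i).take (pvA_scanEnd cs i - i)))]) := by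
  have hsw := pvA_skipWs_stop cs i h hw
  conv_lhs => rw [pvA_row_go]
  simp only [hsw]
  rw [dif_pos h]

-- pvB_go in states 0 and 1 does not depend on the quote buffer
theorem pvB_buf_indep_aux (cs : List Char) : ∀ k i, cs.length - i ≤ k →
    ∀ st row rows buf buf', st = 0 ∨ st = 1 →
      pvB_go cs i st row buf rows = pvB_go cs i st row buf' rows := by
  intro k
  induction k with
  | zero =>
    intro i hk st row rows buf buf' hst
    conv_lhs => rw [pvB_go]
    conv_rhs => rw [pvB_go]
    rw [dif_neg (by omega : ¬ i < cs.length), dif_neg (by omega : ¬ i < cs.length)]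
    rcases hst with h | h <;> subst h <;> simp
  | succ k ih =>
    intro i hk st row rows buf buf' hst
    by_cases h : i < cs.length
    · rcases hst with h0 | h1
      · subst h0
        conv_lhs => rw [pvB_go]
        conv_rhs => rw [pvB_go]
        rw [dif_pos h, dif_pos h]
        norm_num
        split_ifs
        · exact ih (i+1) (by omega) 1 [] rows buf buf' (Or.inr rfl)
        · exact ih (i+1) (by omega) 0 row rows buf buf' (Or.inl rfl)
      · subst h1
        conv_lhs => rw [pvB_go]
        conv_rhs => rw [pvB_go]
        rw [dif_pos h, dif_pos h]
        norm_num
        split_ifs with hw hp hc hq hn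
        · exact ih (i+1) (by omega) 1 row rows buf buf' (Or.inr rfl)
        · exact ih (i+1) (by omega) 0 [] (rows ++ [row]) buf buf' (Or.inl rfl)
        · exact ih (i+1) (by omega) 1 row rows buf buf' (Or.inr rfl)
        · rfl
        · exact ih (i+4) (by omega) 1 (row ++ ["NULL"]) rows buf buf' (Or.inr rfl)
        · have := pvB_scan_gt cs i h (by assumption) (by assumption)
          exact ih (pvB_scan cs i) (by omega) 1 _ rows buf buf' (Or.inr rfl)
    · conv_lhs => rw [pvB_go]
      conv_rhs => rw [pvB_go]
      rw [dif_neg h, dif_neg h]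
      rcases hst with h0 | h0 <;> subst h0 <;> simp

theorem pvB_buf_indep1 (cs : List Char) (i : Nat) (row : List String)
    (rows : List (List String)) (buf buf' : List String) :
    pvB_go cs i 1 row buf rows = pvB_go cs i 1 row buf' rows :=
  pvB_buf_indep_aux cs (cs.length - i) i le_rfl 1 row rows buf buf' (Or.inr rfl)

theorem pv_main_eof (cs : List Char) (i : Nat) (h : cs.length ≤ i) :
    ((∀ row buf rows, pvB_go cs i 0 row buf rows = pvA_outer cs i rows) ∧
     (∀ row buf rows, pvB_go cs i 1 row buf rows =
        pvA_outer cs (pvA_row_go cs i row).2 (rows ++ [(pvA_row_go cs i row).1])) ∧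
     (∀ row buf rows, pvB_go cs i 2 row buf rows =
        pvB_go cs (pvA_quoted_go cs i buf).2 1 (row ++ [(pvA_quoted_go cs i buf).1]) buf rows)) := by
  have hne : ¬ i < cs.length := by omega
  refine ⟨?_, ?_, ?_⟩ <;> intro row buf rows
  · conv_lhs => rw [pvB_go, dif_neg hne]
    conv_rhs => rw [pvA_outer, dif_neg hne]
    norm_num
  · rw [pvA_row_go_eof cs i row h]
    show _ = pvA_outer cs i (rows ++ [row])
    conv_lhs => rw [pvB_go, dif_neg hne]
    conv_rhs => rw [pvA_outer, dif_neg hne]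
    norm_num
  · conv_rhs => rw [pvA_quoted_go, dif_neg hne]
    show _ = pvB_go cs i 1 (row ++ [PySem.Str.join "" buf]) buf rows
    conv_lhs => rw [pvB_go, dif_neg hne]
    conv_rhs => rw [pvB_go, dif_neg hne]
    norm_num

theorem pv_main (cs : List Char) : ∀ k i, cs.length - i ≤ k →
    ((∀ row buf rows, pvB_go cs i 0 row buf rows = pvA_outer cs i rows) ∧
     (∀ row buf rows, pvB_go cs i 1 row buf rows =
        pvA_outer cs (pvA_row_go cs i row).2 (rows ++ [(pvA_row_go cs i row).1])) ∧
     (∀ row buf rows, pvB_go cs i 2 row buf rows =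
        pvB_go cs (pvA_quoted_go cs i buf).2 1 (row ++ [(pvA_quoted_go cs i buf).1]) buf rows)) := by
  intro k
  induction k with
  | zero => intro i hk; exact pv_main_eof cs i (by omega)
  | succ k ih =>
    intro i hk
    by_cases h : i < cs.length
    · refine ⟨?_, ?_, ?_⟩
      · -- state 0: outside a row
        intro row buf rows
        conv_lhs => rw [pvB_go, dif_pos h]
        conv_rhs => rw [pvA_outer, dif_pos h]
        norm_num
        by_cases hp : cs[i] = '('
        · rw [if_pos hp, if_pos hp, (ih (i+1) (by omega)).2.1 [] buf rows]
        · rw [if_neg hp, if_neg hp, (ih (i+1) (by omega)).1 row buf rows]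
      · -- state 1: inside a row
        intro row buf rows
        conv_lhs => rw [pvB_go, dif_pos h]
        norm_num
        by_cases hw : cs[i] = ' ' ∨ cs[i] = '\t' ∨ cs[i] = '\n'
        · rw [if_pos hw, (ih (i+1) (by omega)).2.1 row buf rows, pvA_row_go_ws cs i row h hw]
        · rw [if_neg hw, pvA_row_go_step cs i row h hw]
          by_cases h1 : cs[i] = ')'
          · rw [if_pos h1, if_pos h1, (ih (i+1) (by omega)).1 [] buf (rows ++ [row])]
          · rw [if_neg h1, if_neg h1]
            by_cases h2 : cs[i] = ','
            · rw [if_pos h2, if_pos h2, (ih (i+1) (by omega)).2.1 row buf rows]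
            · rw [if_neg h2, if_neg h2]
              by_cases h3 : cs[i] = '\''
              · rw [if_pos h3, if_pos h3]
                have hq := pvA_quoted_go_ge cs (i+1) []
                rw [(ih (i+1) (by omega)).2.2 row [] rows,
                  (ih (pvA_quoted_go cs (i+1) []).2 (by omega)).2.1
                    (row ++ [(pvA_quoted_go cs (i+1) []).1]) [] rows]
              · rw [if_neg h3, if_neg h3]
                by_cases h4 : PySem.Chars.upper ((cs.drop i).take 4) = ['N','U','L','L']
                · rw [if_pos h4, if_pos h4, (ih (i+4) (by omega)).2.1 (row ++ ["NULL"]) buf rows]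
                · rw [if_neg h4, if_neg h4]
                  have he := pvA_scanEnd_gt cs i h h2 h1
                  rw [pv_scan_eq cs i, (ih (pvA_scanEnd cs i) (by omega)).2.1 _ buf rows]
      · -- state 2: inside a quoted string
        intro row buf rows
        conv_lhs => rw [pvB_go, dif_pos h]
        conv_rhs => rw [pvA_quoted_go, dif_pos h]
        norm_num
        by_cases e1 : cs[i] = '\\' ∧ i + 1 < cs.length
        · rw [if_pos e1, if_pos e1]
          by_cases n1 : cs[i+1]?.getD ' ' = '\''
          · rw [if_pos n1, if_neg (show ¬ cs[i+1]?.getD ' ' = 'n' by rw [n1]; decide), n1,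
              show String.ofList ['\''] = "'" from rfl,
              (ih (i+2) (by omega)).2.2 row (buf ++ ["'"]) rows]
            exact pvB_buf_indep1 cs _ _ rows (buf ++ ["'"]) buf
          · rw [if_neg n1]
            by_cases n2 : cs[i+1]?.getD ' ' = '\\'
            · rw [if_pos n2, if_neg (show ¬ cs[i+1]?.getD ' ' = 'n' by rw [n2]; decide), n2,
                show String.ofList ['\\'] = "\\" from rfl,
                (ih (i+2) (by omega)).2.2 row (buf ++ ["\\"]) rows]
              exact pvB_buf_indep1 cs _ _ rows (buf ++ ["\\"]) buf
            · rw [if_neg n2]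
              by_cases n3 : cs[i+1]?.getD ' ' = 'n'
              · rw [if_pos n3, if_pos n3, (ih (i+2) (by omega)).2.2 row (buf ++ ["\n"]) rows]
                exact pvB_buf_indep1 cs _ _ rows (buf ++ ["\n"]) buf
              · rw [if_neg n3, if_neg n3,
                  (ih (i+2) (by omega)).2.2 row (buf ++ [String.ofList [cs[i+1]?.getD ' ']]) rows]
                exact pvB_buf_indep1 cs _ _ rows (buf ++ [String.ofList [cs[i+1]?.getD ' ']]) buf
        · rw [if_neg e1, if_neg e1]
          by_cases e2 : cs[i] = '\'' ∧ i + 1 < cs.length ∧ cs[i+1]?.getD ' ' = '\''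
          · rw [if_pos e2, if_pos e2, (ih (i+2) (by omega)).2.2 row (buf ++ ["'"]) rows]
            exact pvB_buf_indep1 cs _ _ rows (buf ++ ["'"]) buf
          · rw [if_neg e2, if_neg e2]
            by_cases e3 : cs[i] = '\''
            · rw [if_pos e3, if_pos e3]
            · rw [if_neg e3, if_neg e3,
                (ih (i+1) (by omega)).2.2 row (buf ++ [String.ofList [cs[i]]]) rows]
              exact pvB_buf_indep1 cs _ _ rows (buf ++ [String.ofList [cs[i]]]) buf
    · exact pv_main_eof cs i (by omega)

-- ===== VERDICT (by name: the statement is the Claim_ definition above) =====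
theorem parse_values_block_py_spec : Claim_equal_parse_values_block_py := by
  intro text _
  unfold Spec_parse_values_block_py parse_values_block_py parse_values_block_py_alt
  exact ((pv_main text.toList text.toList.length 0 (by omega)).1 [] [] []).symm
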